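-- pv_equiv track=rewrite | github.com/ShreyanshSeth26/College-Work | Applied Cryptography/Ass-4/q1_c.py | ChooseExponents
-- ===== SOURCE A (Python) =====
-- from math import gcd
--
-- def ChooseExponents(Phi):
--     Choices = [3, 5, 17, 257, 65537]
--     Valid = [E for E in Choices if E < Phi and gcd(E, Phi) == 1]
--
--     for I in range(len(Valid)):
--         for J in range(I + 1, len(Valid)):
--             if gcd(Valid[I], Valid[J]) == 1:
--                 return Valid[I], Valid[J]
--
--     raise ValueError("Suitable exponents not found")
-- ===== SOURCE B (Python) =====
-- from math import gcd
--
-- def ChooseExponents(Phi):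
--     Choices = [3, 5, 17, 257, 65537]
--     Valid = [E for E in Choices if E < Phi and gcd(E, Phi) == 1]
--     if len(Valid) >= 2:
--         return Valid[0], Valid[1]
--     raise ValueError("Suitable exponents not found")
-- ===== Notes on version B (the rewrite author's own statement) =====
-- stated objective: simpler
-- what changed: Replaces the O(k^2) nested coprime-pair search over the filtered candidates with a direct pick of the first two survivors, valid because the fixed candidates 3,5,17,257,65537 are pairwise coprime.
import Mathlib
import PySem

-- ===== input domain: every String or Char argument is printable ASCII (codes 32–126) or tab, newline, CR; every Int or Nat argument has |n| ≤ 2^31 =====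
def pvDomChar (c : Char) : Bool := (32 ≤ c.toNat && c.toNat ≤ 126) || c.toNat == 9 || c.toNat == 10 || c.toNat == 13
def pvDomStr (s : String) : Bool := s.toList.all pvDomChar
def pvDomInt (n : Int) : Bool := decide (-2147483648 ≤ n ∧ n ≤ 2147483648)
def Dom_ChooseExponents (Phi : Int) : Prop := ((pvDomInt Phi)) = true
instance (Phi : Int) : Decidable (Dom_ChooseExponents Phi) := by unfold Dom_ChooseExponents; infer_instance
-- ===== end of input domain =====

-- B replaces A's nested coprime-pair search with a direct pick of the first two filtered
-- candidates (valid because the fixed candidates are pairwise coprime); return values only.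

-- shared helper: the comprehension [E for E in Choices if E < Phi and gcd(E, Phi) == 1],
-- identical in both Pythons
def pvValid (Phi : Int) : List Int :=
  ([3, 5, 17, 257, 65537] : List Int).filter
    (fun E => decide (E < Phi) && (Int.gcd E Phi == 1))

-- ===== PORT A =====
-- nested loops with first-return semantics via an Option accumulator; the raise branch
-- (found = none) is excluded by Pre_ and mapped to (0, 0)
def ChooseExponents (Phi : Int) : Int × Int :=
  let Valid := pvValid Phi
  let found :=
    (PySem.List.pyRange 0 Valid.length 1).foldl (fun acc I =>
      (PySem.List.pyRange (I + 1) Valid.length 1).foldl (fun acc2 J =>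
        match acc2 with
        | some p => some p
        | none =>
          let vi := (PySem.List.pyGet? Valid I).getD 0
          let vj := (PySem.List.pyGet? Valid J).getD 0
          if Int.gcd vi vj == 1 then some (vi, vj) else none) acc) none
  found.getD (0, 0)

-- ===== PORT B =====
-- same comprehension, then directly the first two survivors (raise branch → (0, 0), outside Pre_)
def ChooseExponents_alt (Phi : Int) : Int × Int :=
  match pvValid Phi with
  | a :: b :: _ => (a, b)
  | _ => (0, 0)

-- ===== PRECONDITION & SPEC =====
-- Pre_: at least two of the fixed candidates survive the filter — exactly the inputs on
-- which the Python A returns (otherwise both Pythons raise ValueError)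
def Pre_ChooseExponents (Phi : Int) : Prop := 2 ≤ (pvValid Phi).length
instance (Phi : Int) : Decidable (Pre_ChooseExponents Phi) := by unfold Pre_ChooseExponents; infer_instance
def pvWitness_ChooseExponents : Int := 100

def Spec_ChooseExponents (Phi : Int) (out : Int × Int) : Prop := out = ChooseExponents_alt Phi
instance (Phi : Int) (out : Int × Int) : Decidable (Spec_ChooseExponents Phi out) := by unfold Spec_ChooseExponents; infer_instance

-- ===== CLAIM (what is proved, stated in full; the proofs are below) =====
def Claim_equal_ChooseExponents : Prop := ∀ (Phi : Int), Dom_ChooseExponents Phi → Pre_ChooseExponents Phi → Spec_ChooseExponents Phi (ChooseExponents Phi)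

-- ===== LEMMAS AND PROOFS =====

-- ===== VERDICT (by name: the statement is the Claim_ definition above) =====
theorem ChooseExponents_spec : Claim_equal_ChooseExponents := by
  intro Phi _ hPre
  unfold Spec_ChooseExponents ChooseExponents ChooseExponents_alt
  unfold Pre_ChooseExponents at hPre
  unfold pvValid at hPre ⊢
  cases h3 : decide ((3:Int) < Phi) && (Int.gcd 3 Phi == 1) <;>
  cases h5 : decide ((5:Int) < Phi) && (Int.gcd 5 Phi == 1) <;>
  cases h17 : decide ((17:Int) < Phi) && (Int.gcd 17 Phi == 1) <;>
  cases h257 : decide ((257:Int) < Phi) && (Int.gcd 257 Phi == 1) <;>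
  cases h65537 : decide ((65537:Int) < Phi) && (Int.gcd 65537 Phi == 1) <;>
  simp only [List.filter_cons, List.filter_nil, h3, h5, h17, h257, h65537, reduceIte] <;>
  rfl
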